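-- pv_equiv track=rewrite | github.com/AlexPerazzo/AdventofCode2022 | Advent Of Code 2022/Fresh 11th, 2022.py | monkey5_throw
-- ===== SOURCE A (Python) =====
-- def monkey5_throw(monkey0_count, monkey0_list, monkey6_list, monkey2_list):
--     for item in monkey0_list:
--         value = 8 + item
--         while value > 10000000:
--             value = value - 9699690
--
--         if value % 5 == 0:
--             monkey6_list.append(value)
--         else:
--             monkey2_list.append(value)
--         monkey0_count += 1
--     monkey0_list.clear()
--
--     return monkey0_count, monkey0_list, monkey6_list, monkey2_list
-- ===== SOURCE B (Python) =====
-- def monkey5_throw(monkey0_count, monkey0_list, monkey6_list, monkey2_list):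
--     # closed-form reduction replaces the repeated-subtraction while loop
--     reduced = [v if v <= 10000000 else (v - 10000001) % 9699690 + 300311
--                for v in (8 + item for item in monkey0_list)]
--     monkey6_list.extend(v for v in reduced if v % 5 == 0)
--     monkey2_list.extend(v for v in reduced if v % 5 != 0)
--     monkey0_count += len(monkey0_list)
--     monkey0_list.clear()
--     return monkey0_count, monkey0_list, monkey6_list, monkey2_list
-- ===== Notes on version B (the rewrite author's own statement) =====
-- stated objective: alternative
-- what changed: The repeated-subtraction while loop is replaced by a closed-form modulo reduction, and the per-item branch loop by a map plus two filters with the count taken as the list length; on the tested random inputs the while loop runs few iterations, so this is not measurably faster.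
import Mathlib
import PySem

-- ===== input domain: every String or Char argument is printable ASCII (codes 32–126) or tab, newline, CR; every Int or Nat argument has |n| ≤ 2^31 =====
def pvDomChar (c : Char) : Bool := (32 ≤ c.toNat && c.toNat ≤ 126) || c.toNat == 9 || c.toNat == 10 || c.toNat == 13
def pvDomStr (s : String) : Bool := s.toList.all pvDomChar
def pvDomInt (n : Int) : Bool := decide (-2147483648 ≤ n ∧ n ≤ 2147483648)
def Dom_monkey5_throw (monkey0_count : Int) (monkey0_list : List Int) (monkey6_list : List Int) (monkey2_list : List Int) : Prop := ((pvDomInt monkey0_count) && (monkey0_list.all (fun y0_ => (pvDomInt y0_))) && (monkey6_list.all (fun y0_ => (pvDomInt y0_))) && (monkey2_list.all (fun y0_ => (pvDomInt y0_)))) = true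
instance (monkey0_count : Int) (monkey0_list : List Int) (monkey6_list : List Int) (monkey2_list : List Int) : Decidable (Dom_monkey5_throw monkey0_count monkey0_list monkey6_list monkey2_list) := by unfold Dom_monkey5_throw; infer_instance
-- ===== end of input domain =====

-- B replaces A's repeated-subtraction while loop by a closed-form mod reduction and
-- splits the items into the two output lists with filters; equivalence is about the
-- RETURN value (both Pythons mutate the list arguments in the same way).

-- ===== PORT A =====
-- while value > 10000000: value = value - 9699690
def pyWhile5 (v : Int) : Int :=
  if v > 10000000 then pyWhile5 (v - 9699690) else v
termination_by (v - 10000000).toNat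
decreasing_by omega

-- the for-loop of A over monkey0_list, carrying (count, m6, m2)
def monkey5Go : List Int → Int → List Int → List Int → Int × List Int × List Int × List Int
  | [], c, m6, m2 => (c, [], m6, m2)  -- monkey0_list.clear() after the loop
  | item :: rest, c, m6, m2 =>
    let value := pyWhile5 (8 + item)
    if PySem.Int.mod value 5 == 0 then monkey5Go rest (c + 1) (m6 ++ [value]) m2
    else monkey5Go rest (c + 1) m6 (m2 ++ [value])

def monkey5_throw (monkey0_count : Int) (monkey0_list : List Int) (monkey6_list : List Int) (monkey2_list : List Int) : Int × List Int × List Int × List Int :=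
  monkey5Go monkey0_list monkey0_count monkey6_list monkey2_list

-- ===== PORT B =====
-- closed-form reduction: v if v <= 10000000 else (v - 10000001) % 9699690 + 300311
def reduceMod (v : Int) : Int :=
  if v ≤ 10000000 then v else PySem.Int.mod (v - 10000001) 9699690 + 300311

def monkey5_throw_alt (monkey0_count : Int) (monkey0_list : List Int) (monkey6_list : List Int) (monkey2_list : List Int) : Int × List Int × List Int × List Int :=
  let reduced := monkey0_list.map (fun item => reduceMod (8 + item))
  (monkey0_count + monkey0_list.length, ([] : List Int),
   monkey6_list ++ reduced.filter (fun v => PySem.Int.mod v 5 == 0),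
   monkey2_list ++ reduced.filter (fun v => !(PySem.Int.mod v 5 == 0)))

-- ===== PRECONDITION & SPEC =====
def Spec_monkey5_throw (monkey0_count : Int) (monkey0_list : List Int) (monkey6_list : List Int) (monkey2_list : List Int) (out : Int × List Int × List Int × List Int) : Prop := out = monkey5_throw_alt monkey0_count monkey0_list monkey6_list monkey2_list
instance (monkey0_count : Int) (monkey0_list : List Int) (monkey6_list : List Int) (monkey2_list : List Int) (out : Int × List Int × List Int × List Int) : Decidable (Spec_monkey5_throw monkey0_count monkey0_list monkey6_list monkey2_list out) := by unfold Spec_monkey5_throw; infer_instance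

-- ===== CLAIM (what is proved, stated in full; the proofs are below) =====
def Claim_equal_monkey5_throw : Prop := ∀ (monkey0_count : Int) (monkey0_list : List Int) (monkey6_list : List Int) (monkey2_list : List Int), Dom_monkey5_throw monkey0_count monkey0_list monkey6_list monkey2_list → Spec_monkey5_throw monkey0_count monkey0_list monkey6_list monkey2_list (monkey5_throw monkey0_count monkey0_list monkey6_list monkey2_list)

-- ===== LEMMAS AND PROOFS =====

-- ===== VERDICT (by name: the statement is the Claim_ definition above) =====
lemma reduceMod_sub (v : Int) (h : v > 10000000) : reduceMod (v - 9699690) = reduceMod v := by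
  simp only [reduceMod, PySem.Int.mod, Int.fmod_eq_emod]
  split_ifs <;> omega

lemma pyWhile5_eq_reduceMod (v : Int) : pyWhile5 v = reduceMod v := by
  induction v using pyWhile5.induct with
  | case1 v hv ih => rw [pyWhile5, if_pos hv, ih, reduceMod_sub v hv]
  | case2 v hv => rw [pyWhile5, if_neg hv]; simp [reduceMod]; omega

lemma monkey5Go_eq (l : List Int) : ∀ (c : Int) (m6 m2 : List Int),
    monkey5Go l c m6 m2 =
      (c + l.length, ([] : List Int),
       m6 ++ (l.map (fun item => reduceMod (8 + item))).filter (fun v => PySem.Int.mod v 5 == 0),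
       m2 ++ (l.map (fun item => reduceMod (8 + item))).filter (fun v => !(PySem.Int.mod v 5 == 0))) := by
  induction l with
  | nil => intro c m6 m2; simp [monkey5Go]
  | cons x xs ih =>
    intro c m6 m2
    simp only [monkey5Go, pyWhile5_eq_reduceMod]
    by_cases h : PySem.Int.mod (reduceMod (8 + x)) 5 == 0
    · rw [if_pos h, ih]
      simp only [List.map_cons, List.filter_cons, h, Bool.not_true, if_pos, if_neg,
        cond_true, cond_false, List.length_cons, List.append_assoc, List.singleton_append,
        Prod.mk.injEq, Bool.false_eq_true, ite_false, ite_true, and_true, true_and, eq_self_iff_true]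
      push_cast; ring
    · rw [if_neg h, ih]
      simp only [List.map_cons, List.filter_cons, h, Bool.not_false, if_pos, if_neg,
        Prod.mk.injEq, List.length_cons, List.append_assoc, List.singleton_append,
        Bool.false_eq_true, ite_false, ite_true, and_true, true_and, eq_self_iff_true]
      push_cast; ring

theorem monkey5_throw_spec : Claim_equal_monkey5_throw := by
  intro c l m6 m2 _
  unfold Spec_monkey5_throw monkey5_throw monkey5_throw_alt
  exact monkey5Go_eq l c m6 m2
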